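-- pv_equiv track=rewrite | github.com/Vuugithub0523/PBL6 | Mediapipe/Mediapipe/unified_server.py | segment_vietnamese_no_accent
-- ===== SOURCE A (Python) =====
-- VIETNAMESE_DICT = {
--     'chao', 'cac', 'ban', 'toi', 'la', 'ten', 'gi', 'cam', 'on', 'khong', 'vang',
--     'da', 'duoc', 'roi', 'oi', 'a', 'u', 'xin', 'chi', 'minh', 'chung',
--     'may', 'no', 'ho', 'nguoi', 'ong', 'ba', 'chu', 'bac', 'co', 'di',
--     'bo', 'me', 'gai', 'noi', 'ngoai', 'chau', 'bau', 'vo', 'chong', 'dinh',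
--     'tre', 'gia', 'lon', 'nho', 'be', 'thap', 'gay', 'map', 'dep', 'xau', 'tot',
--     'di', 'den', 've', 'len', 'xuong', 'vao', 'lam', 'an', 'uong', 'ngu',
--     'thuc', 'day', 'nhin', 'doc', 'viet', 'noi', 'hoi', 'tra', 'loi',
--     'hoc', 'choi', 'biet', 'hieu', 'yeu', 'thuong', 'ghet', 'thich', 'muon',
--     'can', 'phai', 'nen', 'dung', 'ngoi', 'nam', 'chay', 'nhay',
--     'mo', 'dong', 'bat', 'tat', 'mua', 'ban', 'gui', 'nhan', 'goi', 'tim', 'kiem',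
--     'rat', 'qua', 'lam', 'hoi', 'kha', 'tuong', 'doi', 'nua', 'cung', 'dang', 'se',
--     'mot', 'hai', 'ba', 'bon', 'nam', 'sau', 'bay', 'tam', 'chin', 'muoi',
--     'gio', 'phut', 'ngay', 'thang', 'nam', 'tuan', 'thoi', 'sang', 'chieu', 'toi',
--     'nha', 'truong', 'lop', 'vien', 'benh', 'ngan', 'hang', 'cho', 'sieu', 'thi',
--     'viet', 'ha', 'noi', 'da', 'nang', 'mau', 'do', 'vang', 'xanh', 'den', 'trang',
-- }
--
-- def segment_vietnamese_no_accent(text):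
--     """Tách từ tiếng Việt không dấu"""
--     text = text.lower().strip()
--     n = len(text)
--
--     dp = [(-1, -1)] * (n + 1)
--     dp[0] = (0, 0)
--
--     for i in range(1, n + 1):
--         for j in range(max(0, i - 15), i):
--             word = text[j:i]
--             if word in VIETNAMESE_DICT and dp[j][0] != -1:
--                 if dp[i][0] == -1 or dp[j][0] + 1 > dp[i][0]:
--                     dp[i] = (dp[j][0] + 1, j)
--
--     if dp[n][0] == -1:
--         return list(text)
--
--     words = []
--     pos = n
--     while pos > 0:
--         start_pos = dp[pos][1]
--         if start_pos == pos:
--             break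
--         words.append(text[start_pos:pos])
--         pos = start_pos
--
--     words.reverse()
--     if pos > 0:
--         words.insert(0, text[:pos])
--
--     return words if words else [text]
-- ===== SOURCE B (Python) =====
-- VIETNAMESE_DICT = {
--     'chao', 'cac', 'ban', 'toi', 'la', 'ten', 'gi', 'cam', 'on', 'khong', 'vang',
--     'da', 'duoc', 'roi', 'oi', 'a', 'u', 'xin', 'chi', 'minh', 'chung',
--     'may', 'no', 'ho', 'nguoi', 'ong', 'ba', 'chu', 'bac', 'co', 'di',
--     'bo', 'me', 'gai', 'noi', 'ngoai', 'chau', 'bau', 'vo', 'chong', 'dinh',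
--     'tre', 'gia', 'lon', 'nho', 'be', 'thap', 'gay', 'map', 'dep', 'xau', 'tot',
--     'di', 'den', 've', 'len', 'xuong', 'vao', 'lam', 'an', 'uong', 'ngu',
--     'thuc', 'day', 'nhin', 'doc', 'viet', 'noi', 'hoi', 'tra', 'loi',
--     'hoc', 'choi', 'biet', 'hieu', 'yeu', 'thuong', 'ghet', 'thich', 'muon',
--     'can', 'phai', 'nen', 'dung', 'ngoi', 'nam', 'chay', 'nhay',
--     'mo', 'dong', 'bat', 'tat', 'mua', 'ban', 'gui', 'nhan', 'goi', 'tim', 'kiem',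
--     'rat', 'qua', 'lam', 'hoi', 'kha', 'tuong', 'doi', 'nua', 'cung', 'dang', 'se',
--     'mot', 'hai', 'ba', 'bon', 'nam', 'sau', 'bay', 'tam', 'chin', 'muoi',
--     'gio', 'phut', 'ngay', 'thang', 'nam', 'tuan', 'thoi', 'sang', 'chieu', 'toi',
--     'nha', 'truong', 'lop', 'vien', 'benh', 'ngan', 'hang', 'cho', 'sieu', 'thi',
--     'viet', 'ha', 'noi', 'da', 'nang', 'mau', 'do', 'vang', 'xanh', 'den', 'trang',
-- }
--
--
-- def segment_vietnamese_no_accent(text):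
--     """Tach tu tieng Viet khong dau - stores the best segmentation itself per prefix."""
--     text = text.lower().strip()
--     if not text:
--         return [text]
--     n = len(text)
--     # best[e] = (word_count, words) for the best segmentation of text[:e], or None
--     best = [None] * (n + 1)
--     best[0] = (0, [])
--     for end in range(1, n + 1):
--         b = None
--         for j in range(max(0, end - 15), end):
--             word = text[j:end]
--             if word in VIETNAMESE_DICT:
--                 p = best[j]
--                 if p is not None and (b is None or p[0] + 1 > b[0]):
--                     b = (p[0] + 1, p[1] + [word])
--         best[end] = b
--     if best[n] is None:
--         return list(text)
--     return best[n][1]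
-- ===== Notes on version B (the rewrite author's own statement) =====
-- stated objective: simpler
-- what changed: Same prefix DP recurrence, but each table entry stores the best segmentation list itself (Option of count x words) instead of a (count, backpointer) int pair, which removes A's sentinel -1 encoding and the whole backward reconstruction phase (while loop, reverse, insert).
import Mathlib
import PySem

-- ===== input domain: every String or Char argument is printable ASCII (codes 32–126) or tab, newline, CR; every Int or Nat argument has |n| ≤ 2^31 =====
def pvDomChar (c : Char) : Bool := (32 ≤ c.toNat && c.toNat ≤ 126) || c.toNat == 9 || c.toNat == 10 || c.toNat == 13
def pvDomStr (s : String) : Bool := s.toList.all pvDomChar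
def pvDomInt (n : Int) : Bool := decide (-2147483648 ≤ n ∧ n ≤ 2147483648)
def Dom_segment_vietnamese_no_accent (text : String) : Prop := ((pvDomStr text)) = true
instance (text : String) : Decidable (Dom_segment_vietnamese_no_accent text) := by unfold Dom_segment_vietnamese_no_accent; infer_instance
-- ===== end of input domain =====

-- B stores the best segmentation list per prefix instead of A's (count, backpointer)
-- pairs, removing the -1 sentinels and the whole backward-reconstruction phase (simpler).

-- the module-level Python set VIETNAMESE_DICT; it is only ever used for membership
-- tests, so a list of its member strings is exact
def VIETNAMESE_DICT : List (List Char) :=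
  ["chao", "cac", "ban", "toi", "la", "ten", "gi", "cam", "on", "khong", "vang",
   "da", "duoc", "roi", "oi", "a", "u", "xin", "chi", "minh", "chung",
   "may", "no", "ho", "nguoi", "ong", "ba", "chu", "bac", "co", "di",
   "bo", "me", "gai", "noi", "ngoai", "chau", "bau", "vo", "chong", "dinh",
   "tre", "gia", "lon", "nho", "be", "thap", "gay", "map", "dep", "xau", "tot",
   "den", "ve", "len", "xuong", "vao", "lam", "an", "uong", "ngu",
   "thuc", "day", "nhin", "doc", "viet", "hoi", "tra", "loi",
   "hoc", "choi", "biet", "hieu", "yeu", "thuong", "ghet", "thich", "muon",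
   "can", "phai", "nen", "dung", "ngoi", "nam", "chay", "nhay",
   "mo", "dong", "bat", "tat", "mua", "gui", "nhan", "goi", "tim", "kiem",
   "rat", "qua", "kha", "tuong", "doi", "nua", "cung", "dang", "se",
   "mot", "hai", "bon", "sau", "bay", "tam", "chin", "muoi",
   "gio", "phut", "ngay", "thang", "tuan", "thoi", "sang", "chieu",
   "nha", "truong", "lop", "vien", "benh", "ngan", "hang", "cho", "sieu", "thi",
   "ha", "nang", "mau", "do", "xanh", "trang"].map String.toList

-- ===== PORT A =====
-- the dp-filling double loop: dp = [(-1,-1)]*(n+1); dp[0]=(0,0); for i in range(1,n+1): for j in range(max(0,i-15), i): …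
def pvDpA (t : List Char) : List (Int × Int) :=
  let n := t.length
  (List.range' 1 n).foldl (fun dp (i : Nat) =>
    (List.range' (i - 15) (i - (i - 15))).foldl (fun dp (j : Nat) =>   -- range(max(0,i-15), i): Nat subtraction clamps at 0
      let word := PySem.List.slice t (some (j : Int)) (some (i : Int))
      if VIETNAMESE_DICT.contains word = true ∧ (dp.getD j (-1, -1)).1 ≠ -1 then
        if (dp.getD i (-1, -1)).1 = -1 ∨ (dp.getD j (-1, -1)).1 + 1 > (dp.getD i (-1, -1)).1 then
          dp.set i ((dp.getD j (-1, -1)).1 + 1, (j : Int))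
        else dp
      else dp) dp)
    ((List.replicate (n + 1) ((-1 : Int), (-1 : Int))).set 0 (0, 0))

-- the reconstruction 'while pos > 0' loop; fuel (n+1 at the call site) only totalises it
def pvBuildA (t : List Char) (dp : List (Int × Int)) : Nat → Int → List (List Char) → List (List Char) × Int
  | 0, pos, ws => (ws, pos)
  | fuel + 1, pos, ws =>
    if pos > 0 then
      let start_pos := (PySem.List.pyGetD dp pos ((-1 : Int), (-1 : Int))).2
      if start_pos = pos then (ws, pos)
      else pvBuildA t dp fuel start_pos (ws ++ [PySem.List.slice t (some start_pos) (some pos)])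
    else (ws, pos)

def segment_vietnamese_no_accent (text : String) : List String :=
  let t := PySem.Chars.strip (PySem.Chars.lower text.toList)   -- text = text.lower().strip()
  let n := t.length
  let dp := pvDpA t
  if (PySem.List.pyGetD dp (n : Int) ((-1 : Int), (-1 : Int))).1 = -1 then
    t.map (fun c => String.ofList [c])                         -- return list(text)
  else
    let r := pvBuildA t dp (n + 1) (n : Int) []
    let words := r.1.reverse
    let words := if r.2 > 0 then PySem.List.slice t none (some r.2) :: words else words
    if words = [] then [String.ofList t] else words.map String.ofList  -- return words if words else [text]

-- ===== PORT B =====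
-- one row of B's table: the inner 'for j in range(max(0, end-15), end)' loop
def pvRowB (t : List Char) (tab : List (Option (Nat × List (List Char)))) (e : Nat) :
    Option (Nat × List (List Char)) :=
  (List.range' (e - 15) (e - (e - 15))).foldl (fun b (j : Nat) =>
    let word := PySem.List.slice t (some (j : Int)) (some (e : Int))
    if VIETNAMESE_DICT.contains word = true then
      match tab.getD j none with
      | some p =>
        match b with
        | none => some (p.1 + 1, p.2 ++ [word])
        | some q => if p.1 + 1 > q.1 then some (p.1 + 1, p.2 ++ [word]) else b
      | none => b
    else b) none

-- best[0..m]: the table filled left to right (best[0] = (0, []))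
def pvTabB (t : List Char) : Nat → List (Option (Nat × List (List Char)))
  | 0 => [some (0, [])]
  | e + 1 => let tab := pvTabB t e
             tab ++ [pvRowB t tab (e + 1)]

def segment_vietnamese_no_accent_alt (text : String) : List String :=
  let t := PySem.Chars.strip (PySem.Chars.lower text.toList)
  if t = [] then [String.ofList t]
  else
    let n := t.length
    match (pvTabB t n).getD n none with
    | none => t.map (fun c => String.ofList [c])
    | some p => p.2.map String.ofList

-- ===== PRECONDITION & SPEC =====
def Spec_segment_vietnamese_no_accent (text : String) (out : List String) : Prop := out = segment_vietnamese_no_accent_alt text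
instance (text : String) (out : List String) : Decidable (Spec_segment_vietnamese_no_accent text out) := by unfold Spec_segment_vietnamese_no_accent; infer_instance

-- ===== CLAIM (what is proved, stated in full; the proofs are below) =====
def Claim_equal_segment_vietnamese_no_accent : Prop := ∀ (text : String), Dom_segment_vietnamese_no_accent text → Spec_segment_vietnamese_no_accent text (segment_vietnamese_no_accent text)

-- ===== LEMMAS AND PROOFS =====

-- B's table value at position e (the value best[e] has once written, never overwritten)
def pvBval (t : List Char) (e : Nat) : Option (Nat × List (List Char)) :=
  (pvTabB t e).getD e none

theorem pvTabB_length (t : List Char) (m : Nat) : (pvTabB t m).length = m + 1 := by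
  induction m with
  | zero => rfl
  | succ e ih => simp [pvTabB, ih]

theorem pvTabB_getD (t : List Char) (m j : Nat) (hj : j ≤ m) :
    (pvTabB t m).getD j none = pvBval t j := by
  induction m with
  | zero => interval_cases j; rfl
  | succ e ih =>
    rcases Nat.lt_or_ge j (e + 1) with h | h
    · rw [← ih (by omega)]
      simp only [pvTabB, List.getD]
      rw [List.getElem?_append_left (by simpa [pvTabB_length] using h)]
    · have : j = e + 1 := by omega
      subst this
      rfl

theorem pvBval_succ (t : List Char) (e : Nat) :
    pvBval t (e + 1) = pvRowB t (pvTabB t e) (e + 1) := by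
  simp only [pvBval, pvTabB, List.getD]
  rw [List.getElem?_append_right (by simp [pvTabB_length])]
  simp [pvTabB_length]

theorem pvBval_zero (t : List Char) : pvBval t 0 = some (0, []) := rfl

-- the relation between A's dp entry at k and B's table value at k
def pvRel (t : List Char) (dp : List (Int × Int)) (k : Nat) : Prop :=
  match pvBval t k with
  | none => dp.getD k (-1, -1) = (-1, -1)
  | some (c, ws) =>
    if k = 0 then dp.getD k (-1, -1) = (0, 0) ∧ c = 0 ∧ ws = []
    else ∃ j, j < k ∧ dp.getD k (-1, -1) = ((c : Int), (j : Int)) ∧ 1 ≤ c ∧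
      ∃ ws', pvBval t j = some (c - 1, ws') ∧
        ws = ws' ++ [PySem.List.slice t (some (j : Int)) (some (k : Int))]

-- invariant carried through A's inner fold paired with B's row fold
def pvInv (t : List Char) (dp0 : List (Int × Int)) (i : Nat)
    (b : Option (Nat × List (List Char))) (dpc : List (Int × Int)) : Prop :=
  dpc.length = dp0.length ∧ (∀ k, k ≠ i → dpc.getD k (-1, -1) = dp0.getD k (-1, -1)) ∧
  match b with
  | none => dpc.getD i (-1, -1) = (-1, -1)
  | some (c, ws) => ∃ j, j < i ∧ dpc.getD i (-1, -1) = ((c : Int), (j : Int)) ∧ 1 ≤ c ∧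
      ∃ ws', pvBval t j = some (c - 1, ws') ∧
        ws = ws' ++ [PySem.List.slice t (some (j : Int)) (some (i : Int))]

theorem pv_fold_pair (t : List Char) (dp0 : List (Int × Int)) (i : Nat)
    (hiR : i < dp0.length)
    (hcnt : ∀ j, j < i → pvRel t dp0 j)
    (L : List Nat) (hL : ∀ j ∈ L, j < i)
    (b : Option (Nat × List (List Char))) (dpc : List (Int × Int))
    (hinv : pvInv t dp0 i b dpc) :
    pvInv t dp0 i
      (L.foldl (fun b (j : Nat) =>
        let word := PySem.List.slice t (some (j : Int)) (some (i : Int))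
        if VIETNAMESE_DICT.contains word = true then
          match pvBval t j with
          | some p =>
            match b with
            | none => some (p.1 + 1, p.2 ++ [word])
            | some q => if p.1 + 1 > q.1 then some (p.1 + 1, p.2 ++ [word]) else b
          | none => b
        else b) b)
      (L.foldl (fun dp (j : Nat) =>
        let word := PySem.List.slice t (some (j : Int)) (some (i : Int))
        if VIETNAMESE_DICT.contains word = true ∧ (dp.getD j (-1, -1)).1 ≠ -1 then
          if (dp.getD i (-1, -1)).1 = -1 ∨ (dp.getD j (-1, -1)).1 + 1 > (dp.getD i (-1, -1)).1 then
            dp.set i ((dp.getD j (-1, -1)).1 + 1, (j : Int))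
          else dp
        else dp) dpc) := by
  induction L generalizing b dpc with
  | nil => simpa using hinv
  | cons j L' ih =>
    simp only [List.foldl_cons]
    have hj : j < i := hL j (by simp)
    apply ih (fun x hx => hL x (by simp [hx]))
    obtain ⟨hlen, hoth, hb⟩ := hinv
    have hiR' : i < dpc.length := by omega
    by_cases hw : VIETNAMESE_DICT.contains (PySem.List.slice t (some (j : Int)) (some (i : Int))) = true
    · cases hBj : pvBval t j with
      | none =>
        have hre := hcnt j hj
        simp only [pvRel, hBj] at hre
        have h1 : (dpc.getD j (-1, -1)).1 = -1 := by rw [hoth j (by omega), hre]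
        simp only [hw, h1]
        simp only [ne_eq, not_true_eq_false, and_false, if_false, if_true]
        exact ⟨hlen, hoth, hb⟩
      | some p =>
        obtain ⟨c', ws'⟩ := p
        have hre := hcnt j hj
        simp only [pvRel, hBj] at hre
        have hj1 : (dpc.getD j (-1, -1)).1 = (c' : Int) := by
          rw [hoth j (by omega)]
          by_cases hj0 : j = 0
          · simp only [hj0, if_true] at hre
            rw [hj0, hre.1, hre.2.1]; rfl
          · simp only [hj0, if_false] at hre
            obtain ⟨j0, _, heq, _⟩ := hre
            rw [heq]
        have hc1 : ¬((dpc.getD j (-1, -1)).1 = -1) := by rw [hj1]; omega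
        simp only [hw, ne_eq, hc1, not_false_eq_true, and_true, if_true]
        cases b with
        | none =>
          have hbi : (dpc.getD i (-1, -1)).1 = -1 := by rw [hb]
          rw [if_pos (Or.inl hbi)]
          refine ⟨by simpa using hlen, ?_, ?_⟩
          · intro k hk
            rw [← hoth k hk]
            simp [List.getD, List.getElem?_set_ne (Ne.symm hk)]
          · refine ⟨j, hj, ?_, by omega, ws', by simp [hBj], rfl⟩
            have hcast : ((c' + 1 : Nat) : Int) = (dpc.getD j (-1, -1)).1 + 1 := by
              rw [hj1]; push_cast; ring
            rw [hcast]
            simp [List.getD, hiR']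
        | some q =>
          obtain ⟨bc, bws⟩ := q
          obtain ⟨j0, hj0i, hbi, hbc1, bws', hBj0, hbws⟩ := hb
          have hbi1 : (dpc.getD i (-1, -1)).1 = (bc : Int) := by rw [hbi]
          by_cases hgt : c' + 1 > bc
          · have hcond : (dpc.getD i (-1, -1)).1 = -1 ∨
                (dpc.getD j (-1, -1)).1 + 1 > (dpc.getD i (-1, -1)).1 := by
              right; rw [hbi1, hj1]; exact_mod_cast hgt
            rw [if_pos hcond]
            simp only [hgt, if_true]
            refine ⟨by simpa using hlen, ?_, ?_⟩
            · intro k hk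
              rw [← hoth k hk]
              simp [List.getD, List.getElem?_set_ne (Ne.symm hk)]
            · refine ⟨j, hj, ?_, by omega, ws', by simp [hBj], rfl⟩
              have hcast : ((c' + 1 : Nat) : Int) = (dpc.getD j (-1, -1)).1 + 1 := by
                rw [hj1]; push_cast; ring
              rw [hcast]
              simp [List.getD, hiR']
          · have hcond : ¬((dpc.getD i (-1, -1)).1 = -1 ∨
                (dpc.getD j (-1, -1)).1 + 1 > (dpc.getD i (-1, -1)).1) := by
              rw [hbi1, hj1]; omega
            rw [if_neg hcond]
            simp only [hgt, if_false]
            exact ⟨hlen, hoth, j0, hj0i, hbi, hbc1, bws', hBj0, hbws⟩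
    · simp only [hw]
      exact ⟨hlen, hoth, hb⟩

-- A's inner fold at row i, and A's dp table after the first m outer iterations
def pvInnerA (t : List Char) (i : Nat) (dp : List (Int × Int)) : List (Int × Int) :=
  (List.range' (i - 15) (i - (i - 15))).foldl (fun dp (j : Nat) =>
    let word := PySem.List.slice t (some (j : Int)) (some (i : Int))
    if VIETNAMESE_DICT.contains word = true ∧ (dp.getD j (-1, -1)).1 ≠ -1 then
      if (dp.getD i (-1, -1)).1 = -1 ∨ (dp.getD j (-1, -1)).1 + 1 > (dp.getD i (-1, -1)).1 then
        dp.set i ((dp.getD j (-1, -1)).1 + 1, (j : Int))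
      else dp
    else dp) dp

def pvDpAUpTo (t : List Char) (m : Nat) : List (Int × Int) :=
  (List.range' 1 m).foldl (fun dp (i : Nat) => pvInnerA t i dp)
    ((List.replicate (t.length + 1) ((-1 : Int), (-1 : Int))).set 0 (0, 0))

theorem pvDpA_eq (t : List Char) : pvDpA t = pvDpAUpTo t t.length := rfl

theorem pv_inner (t : List Char) (dp0 : List (Int × Int)) (i : Nat)
    (hi : 1 ≤ i) (hiR : i < dp0.length)
    (hcnt : ∀ j, j < i → pvRel t dp0 j)
    (hii : dp0.getD i (-1, -1) = (-1, -1)) :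
    pvInv t dp0 i (pvBval t i) (pvInnerA t i dp0) := by
  have hrow : pvBval t i = (List.range' (i - 15) (i - (i - 15))).foldl (fun b (j : Nat) =>
      let word := PySem.List.slice t (some (j : Int)) (some (i : Int))
      if VIETNAMESE_DICT.contains word = true then
        match pvBval t j with
        | some p =>
          match b with
          | none => some (p.1 + 1, p.2 ++ [word])
          | some q => if p.1 + 1 > q.1 then some (p.1 + 1, p.2 ++ [word]) else b
        | none => b
      else b) none := by
    obtain ⟨e, rfl⟩ : ∃ e, i = e + 1 := ⟨i - 1, by omega⟩
    rw [pvBval_succ]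
    unfold pvRowB
    apply PySem.List.foldl_congr_mem
    intro acc x hx
    have hx' : x < e + 1 := by
      have := List.mem_range'_1.mp hx
      omega
    rw [pvTabB_getD t e x (by omega)]
  rw [hrow]
  unfold pvInnerA
  exact pv_fold_pair t dp0 i hiR hcnt _
    (fun j hj => by have := List.mem_range'_1.mp hj; omega)
    none dp0 ⟨rfl, fun k _ => rfl, hii⟩

theorem pvRel_congr (t : List Char) (dp dp' : List (Int × Int)) (k : Nat)
    (h : dp'.getD k (-1, -1) = dp.getD k (-1, -1)) (hr : pvRel t dp k) : pvRel t dp' k := by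
  unfold pvRel at hr ⊢
  cases hBv : pvBval t k with
  | none => simp only [hBv] at hr; simp only [h, hr]
  | some p =>
    obtain ⟨c, ws⟩ := p
    simp only [hBv] at hr ⊢
    by_cases hk0 : k = 0
    · subst hk0
      rw [if_pos rfl] at hr ⊢
      exact ⟨h.trans hr.1, hr.2⟩
    · simp only [hk0, if_false] at hr ⊢
      obtain ⟨j, hj, heq, hrest⟩ := hr
      exact ⟨j, hj, h.trans heq, hrest⟩

theorem pv_outer (t : List Char) (m : Nat) (hm : m ≤ t.length) :
    (pvDpAUpTo t m).length = t.length + 1 ∧ (∀ k, k ≤ m → pvRel t (pvDpAUpTo t m) k) ∧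
      (∀ k, m < k → (pvDpAUpTo t m).getD k (-1, -1) = (-1, -1)) := by
  induction m with
  | zero =>
    unfold pvDpAUpTo
    simp only [List.range', List.foldl_nil]
    refine ⟨by simp, ?_, ?_⟩
    · intro k hk
      interval_cases k
      simp [pvRel, pvBval_zero, List.getD]
    · intro k hk
      simp [List.getD, List.getElem?_set_ne (by omega : (0 : Nat) ≠ k), List.getElem?_replicate]
      split_ifs <;> rfl
  | succ e ih =>
    have ihm := ih (by omega)
    have hstep : pvDpAUpTo t (e + 1) = pvInnerA t (e + 1) (pvDpAUpTo t e) := by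
      unfold pvDpAUpTo
      rw [List.range'_1_concat, List.foldl_append, List.foldl_cons, List.foldl_nil,
        Nat.add_comm 1 e]
    have hinv := pv_inner t (pvDpAUpTo t e) (e + 1) (by omega) (by omega)
      (fun j hj => ihm.2.1 j (by omega)) (ihm.2.2 (e + 1) (by omega))
    rw [hstep]
    obtain ⟨hlen, hoth, hb⟩ := hinv
    refine ⟨by omega, ?_, ?_⟩
    · intro k hk
      rcases Nat.lt_or_ge k (e + 1) with h | h
      · exact pvRel_congr t (pvDpAUpTo t e) _ k (hoth k (by omega)) (ihm.2.1 k (by omega))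
      · have hke : k = e + 1 := by omega
        subst hke
        unfold pvRel
        cases hBv : pvBval t (e + 1) with
        | none => simp only [hBv] at hb ⊢; exact hb
        | some p =>
          obtain ⟨c, ws⟩ := p
          simp only [hBv] at hb ⊢
          rw [if_neg (Nat.succ_ne_zero e)]
          exact hb
    · intro k hk
      rw [hoth k (by omega)]
      exact ihm.2.2 k (by omega)

theorem pv_build (t : List Char) (dpF : List (Int × Int))
    (hRel : ∀ k, k ≤ t.length → pvRel t dpF k) :
    ∀ i, i ≤ t.length → ∀ c ws, pvBval t i = some (c, ws) →
      ∀ fuel, i ≤ fuel → ∀ acc,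
        pvBuildA t dpF fuel (i : Int) acc = (acc ++ ws.reverse, 0) := by
  intro i
  induction i using Nat.strong_induction_on with
  | _ i ih =>
    intro hin c ws hBv fuel hfuel acc
    match i, hBv with
    | 0, hBv =>
      rw [pvBval_zero] at hBv
      obtain ⟨rfl, rfl⟩ : c = 0 ∧ ws = [] := by
        constructor <;> · injection hBv with h; injection h with h1 h2; simp [h1.symm, h2.symm]
      cases fuel <;> simp [pvBuildA]
    | e + 1, hBv =>
      have hre := hRel (e + 1) hin
      simp only [pvRel, hBv, Nat.succ_ne_zero, if_false] at hre
      obtain ⟨j, hj, heq, hc1, ws', hBj, hws⟩ := hre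
      obtain ⟨f, rfl⟩ : ∃ f, fuel = f + 1 := ⟨fuel - 1, by omega⟩
      unfold pvBuildA
      rw [if_pos (by exact_mod_cast Nat.succ_pos e)]
      rw [PySem.List.pyGetD_natCast, heq]
      rw [if_neg (by simp; omega)]
      have := ih j hj (by omega) (c - 1) ws' hBj f (by omega)
        (acc ++ [PySem.List.slice t (some (j : Int)) (some ((e + 1 : Nat) : Int))])
      rw [this]
      simp [hws, List.reverse_append]

-- ===== VERDICT (by name: the statement is the Claim_ definition above) =====
theorem segment_vietnamese_no_accent_spec : Claim_equal_segment_vietnamese_no_accent := by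
  intro text _
  unfold Spec_segment_vietnamese_no_accent
  simp only [segment_vietnamese_no_accent, segment_vietnamese_no_accent_alt]
  set t := PySem.Chars.strip (PySem.Chars.lower text.toList) with ht
  obtain ⟨hlen, hRel, -⟩ := pv_outer t t.length le_rfl
  rw [← pvDpA_eq] at hlen hRel
  have htabn : (pvTabB t t.length).getD t.length none = pvBval t t.length := rfl
  cases hBn : pvBval t t.length with
  | none =>
    have h := hRel t.length le_rfl
    simp only [pvRel, hBn] at h
    have htne : t ≠ [] := by
      intro h0
      rw [h0] at hBn
      simp [pvBval_zero] at hBn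
    rw [PySem.List.pyGetD_natCast, h, if_pos rfl, if_neg htne, htabn, hBn]
  | some p =>
    obtain ⟨c, ws⟩ := p
    by_cases hn0 : t.length = 0
    · have ht0 : t = [] := List.eq_nil_of_length_eq_zero hn0
      rw [ht0]
      decide
    · have h := hRel t.length le_rfl
      simp only [pvRel, hBn, hn0, if_false] at h
      obtain ⟨j, hj, heq, hc1, ws', hBj, hws⟩ := h
      have htne : t ≠ [] := by
        intro h0
        rw [h0] at hn0
        simp at hn0
      have hbuild := pv_build t (pvDpA t) (fun k hk => hRel k hk) t.length le_rfl c ws hBn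
        (t.length + 1) (by omega) []
      rw [PySem.List.pyGetD_natCast, heq, if_neg (show ¬(((c : Int), (j : Int)).1 = -1) by show ¬((c : Int) = -1); omega), hbuild, if_neg htne,
        htabn, hBn]
      have hwsne : ws ≠ [] := by
        rw [hws]
        simp
      simp only [List.nil_append, List.reverse_reverse]
      rw [if_neg (show ¬((0 : Int) > 0) from by norm_num), if_neg hwsne]
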